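-- pv_equiv track=rewrite | github.com/lulia0228/cpp_algorithm | python-algorithm/algo_02_sliding_window/L76-h.py | contain_t
-- ===== SOURCE A (Python) =====
-- def contain_t(record, t):
--     t_d = {}
--     for c in t:
--         if c not in t_d:
--             t_d[c] = 1
--         else:
--             t_d[c] += 1
--     for k,v in t_d.items():
--         if k not in record or record[k] < v:
--             return False
--     return True
-- ===== SOURCE B (Python) =====
-- def contain_t(record, t):
--     s = sorted(t)
--     i, n = 0, len(s)
--     while i < n:
--         j = i + 1
--         while j < n and s[j] == s[i]:
--             j += 1
--         if s[i] not in record or record[s[i]] < j - i: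
--             return False
--         i = j
--     return True
-- ===== Notes on version B (the rewrite author's own statement) =====
-- stated objective: alternative
-- what changed: Replaces A's hash-counting (build a dict of character counts of t, then verify each entry against record) with a dict-free sort-then-scan: sort t, walk runs of equal characters with two indices, and compare each run length against record's budget, early-exiting on the first failing run.
import Mathlib
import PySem

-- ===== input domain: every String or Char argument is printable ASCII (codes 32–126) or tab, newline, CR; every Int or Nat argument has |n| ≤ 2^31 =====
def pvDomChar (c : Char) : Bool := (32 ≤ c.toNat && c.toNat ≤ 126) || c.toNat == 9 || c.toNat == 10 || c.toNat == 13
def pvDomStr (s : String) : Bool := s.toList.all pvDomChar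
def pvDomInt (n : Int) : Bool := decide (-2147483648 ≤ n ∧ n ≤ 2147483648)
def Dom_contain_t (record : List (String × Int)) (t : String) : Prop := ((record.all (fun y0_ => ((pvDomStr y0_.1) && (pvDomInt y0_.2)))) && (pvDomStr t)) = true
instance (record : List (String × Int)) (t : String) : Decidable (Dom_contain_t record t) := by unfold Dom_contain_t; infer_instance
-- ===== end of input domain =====

-- B replaces A's dict-of-counts (count t, then verify the table against record) by a dict-free
-- sort-then-scan: sort t and compare each run of equal characters against record's budget.


-- shared port helpers: lookup in the input dict `record` (assoc list, first match), and the
-- character of t viewed as the 1-character Python string it is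
def pvLookup (record : List (String × Int)) (k : String) : Option Int :=
  (record.find? (fun p => p.1 == k)).map (·.2)
def pvS1 (c : Char) : String := String.ofList [c]

-- ===== PORT A =====
-- A's second loop over t_d.items(), with its early `return False`
def pvCheckA (record : List (String × Int)) : List (String × Int) → Bool
  | [] => true
  | (k, v) :: rest =>
    match pvLookup record k with
    | none => false
    | some r => if r < v then false else pvCheckA record rest

def contain_t (record : List (String × Int)) (t : String) : Bool :=
  let t_d := t.toList.foldl (fun d c =>
    if d.contains (pvS1 c) = false then d.insert (pvS1 c) 1
    else d.insert (pvS1 c) (d.getD (pvS1 c) 0 + 1)) PySem.Dict.empty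
  pvCheckA record t_d.items

-- ===== PORT B =====
-- B's inner while loop: advance j while j < len(s) and s[j] == c  (c = s[i])
def pvRunEnd (s : List Char) (c : Char) (j : Nat) : Nat :=
  if h : j < s.length ∧ s[j]? = some c then pvRunEnd s c (j + 1) else j
termination_by s.length - j
decreasing_by omega

-- needed for pvScan's termination (cited by name in decreasing_by)
theorem pvRunEnd_ge (s : List Char) (c : Char) (j : Nat) : j ≤ pvRunEnd s c j := by
  fun_induction pvRunEnd with
  | case1 j h ih => omega
  | case2 j h => omega

-- B's outer while loop over runs of the sorted list
def pvScan (record : List (String × Int)) (s : List Char) (i : Nat) : Bool :=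
  if hi : i < s.length then
    let c := s[i]
    let j := pvRunEnd s c (i + 1)
    match pvLookup record (pvS1 c) with
    | none => false
    | some r => if r < (j : Int) - (i : Int) then false else pvScan record s j
  else true
termination_by s.length - i
decreasing_by have := pvRunEnd_ge s s[i] (i + 1); omega

def contain_t_alt (record : List (String × Int)) (t : String) : Bool :=
  pvScan record (PySem.List.sorted t.toList (fun x => x) false) 0

-- ===== PRECONDITION & SPEC =====
def Spec_contain_t (record : List (String × Int)) (t : String) (out : Bool) : Prop := out = contain_t_alt record t
instance (record : List (String × Int)) (t : String) (out : Bool) : Decidable (Spec_contain_t record t out) := by unfold Spec_contain_t; infer_instance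

-- ===== CLAIM (what is proved, stated in full; the proofs are below) =====
def Claim_equal_contain_t : Prop := ∀ (record : List (String × Int)) (t : String), Dom_contain_t record t → Spec_contain_t record t (contain_t record t)

-- ===== LEMMAS AND PROOFS =====

theorem pvS1_inj : Function.Injective pvS1 := by
  intro a b h
  have := congrArg String.toList h
  simpa [pvS1, String.toList_ofList] using this

-- the common characterization both ports are reduced to
def pvQ (record : List (String × Int)) (l : List Char) : Prop :=
  ∀ c ∈ l, ∃ r, pvLookup record (pvS1 c) = some r ∧ (l.count c : Int) ≤ r

theorem pvQ_perm (record : List (String × Int)) {l l' : List Char} (h : l.Perm l') :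
    pvQ record l ↔ pvQ record l' := by
  unfold pvQ
  constructor <;> intro hq c hc
  · obtain ⟨r, hr, hle⟩ := hq c (h.mem_iff.2 hc)
    exact ⟨r, hr, by rwa [h.count_eq] at hle⟩
  · obtain ⟨r, hr, hle⟩ := hq c (h.mem_iff.1 hc)
    exact ⟨r, hr, by rwa [h.count_eq]⟩

-- ---- A side ----

theorem pvCheckA_eq_all (record : List (String × Int)) (l : List (String × Int)) :
    pvCheckA record l = l.all (fun p =>
      match pvLookup record p.1 with
      | none => false
      | some r => !(r < p.2)) := by
  induction l with
  | nil => rfl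
  | cons p rest ih =>
    obtain ⟨k, v⟩ := p
    simp only [pvCheckA, List.all_cons]
    cases h : pvLookup record k with
    | none => simp
    | some r => by_cases hr : r < v <;> simp [hr, ih]

theorem contain_t_iff (record : List (String × Int)) (t : String) :
    contain_t record t = true ↔ pvQ record t.toList := by
  unfold contain_t
  have hstep : (fun (d : PySem.Dict String Int) (c : Char) =>
      if d.contains (pvS1 c) = false then d.insert (pvS1 c) 1
      else d.insert (pvS1 c) (d.getD (pvS1 c) 0 + 1))
      = fun d c => d.insert (pvS1 c) (d.getD (pvS1 c) 0 + 1) := by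
    funext d c
    by_cases h : d.contains (pvS1 c) = false
    · rw [if_pos h, PySem.Dict.getD_of_not_contains d 0 h]; norm_num
    · rw [if_neg h]
  rw [hstep]
  have hfold : t.toList.foldl (fun d c => d.insert (pvS1 c) (d.getD (pvS1 c) 0 + 1)) PySem.Dict.empty
      = PySem.Dict.counter (t.toList.map pvS1) := by
    rw [← PySem.Dict.foldl_insert_getD_add_one_eq_counter, List.foldl_map]
  rw [hfold, pvCheckA_eq_all, PySem.Dict.items_counter, List.all_map, List.all_eq_true]
  constructor
  · intro h c hc
    have hk := h (pvS1 c) ((PySem.Set.mem_ofList _ _).2 (List.mem_map_of_mem hc))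
    simp only [Function.comp] at hk
    cases hl : pvLookup record (pvS1 c) with
    | none => rw [hl] at hk; simp at hk
    | some r =>
      refine ⟨r, rfl, ?_⟩
      rw [hl] at hk
      simpa [List.count_map_of_injective _ _ pvS1_inj] using hk
  · intro h k hk
    obtain ⟨c, hc, rfl⟩ := List.mem_map.1 ((PySem.Set.mem_ofList _ _).1 hk)
    obtain ⟨r, hr, hle⟩ := h c hc
    simp only [Function.comp, hr]
    simp [List.count_map_of_injective _ _ pvS1_inj, not_lt, hle]

-- ---- B side ----

-- inner loop = index past the run: k plus the takeWhile length of the tail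
theorem pvRunEnd_eq (s : List Char) (c : Char) (k : Nat) :
    pvRunEnd s c k = k + ((s.drop k).takeWhile (· == c)).length := by
  fun_induction pvRunEnd with
  | case1 k h ih =>
    obtain ⟨hk, hc⟩ := h
    rw [List.drop_eq_getElem_cons hk]
    have : s[k] = c := by simpa [List.getElem?_eq_getElem hk] using hc
    simp [this, ih]
    omega
  | case2 k h =>
    by_cases hk : k < s.length
    · have hc : ¬ s[k]? = some c := fun hc => h ⟨hk, hc⟩
      rw [List.drop_eq_getElem_cons hk]
      have : (s[k] == c) = false := by
        simpa [List.getElem?_eq_getElem hk] using hc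
      simp [this]
    · rw [List.drop_eq_nil_of_le (by omega)]; simp

-- structural reformulation of the outer loop, recursing on the suffix
def pvGroups (record : List (String × Int)) : List Char → Bool
  | [] => true
  | c :: rest =>
    match pvLookup record (pvS1 c) with
    | none => false
    | some r =>
      if r < ((rest.takeWhile (· == c)).length + 1 : Int) then false
      else pvGroups record (rest.dropWhile (· == c))
termination_by l => l.length
decreasing_by simpa [Nat.lt_succ_iff] using List.length_dropWhile_le (· == c) rest

theorem pv_dropWhile_eq_drop (p : Char → Bool) (l : List Char) :
    l.dropWhile p = l.drop (l.takeWhile p).length := by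
  induction l with
  | nil => rfl
  | cons x xs ih =>
    by_cases h : p x <;> simp [h, ih]

theorem pvScan_eq_groups (record : List (String × Int)) (s : List Char) (i : Nat) :
    pvScan record s i = pvGroups record (s.drop i) := by
  fun_induction pvScan with
  | case1 i hi c hl =>
    rw [List.drop_eq_getElem_cons hi, pvGroups, show s[i] = c from rfl, hl]
  | case2 i hi c j r hl hlt =>
    have hj : j = (i + 1) + ((s.drop (i + 1)).takeWhile (· == c)).length :=
      pvRunEnd_eq s c (i + 1)
    have hn : ((((s.drop (i + 1)).takeWhile (· == c)).length : Int) + 1) = (j : Int) - (i : Int) := by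
      rw [hj]; push_cast; ring
    rw [List.drop_eq_getElem_cons hi, pvGroups, show s[i] = c from rfl, hl]
    have h' : r < ((((s.drop (i + 1)).takeWhile (· == c)).length : Int) + 1) := by
      rw [hn]; exact hlt
    exact (if_pos h').symm
  | case3 i hi c j r hl hlt ih =>
    have hj : j = (i + 1) + ((s.drop (i + 1)).takeWhile (· == c)).length :=
      pvRunEnd_eq s c (i + 1)
    have hn : ((((s.drop (i + 1)).takeWhile (· == c)).length : Int) + 1) = (j : Int) - (i : Int) := by
      rw [hj]; push_cast; ring
    rw [ih, List.drop_eq_getElem_cons hi, pvGroups, show s[i] = c from rfl, hl]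
    have h' : ¬ r < ((((s.drop (i + 1)).takeWhile (· == c)).length : Int) + 1) := by
      rw [hn]; exact hlt
    have hdrop : s.drop j = (s.drop (i + 1)).dropWhile (· == c) := by
      rw [hj, pv_dropWhile_eq_drop, List.drop_drop]
    exact (congrArg (pvGroups record) hdrop).trans (if_neg h').symm
  | case4 i hi =>
    rw [List.drop_eq_nil_of_le (by omega), pvGroups]

-- in a sorted list headed by c, no c survives dropWhile (· == c)
theorem pv_no_c_after (c : Char) (rest : List Char) (hp : rest.Pairwise (· ≤ ·))
    (hb : ∀ x ∈ rest, c ≤ x) : c ∉ rest.dropWhile (· == c) := by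
  induction rest with
  | nil => simp
  | cons x xs ih =>
    rw [List.dropWhile_cons]
    by_cases hx : (x == c) = true
    · simp only [hx, if_true]
      exact ih (List.Pairwise.of_cons hp) (fun y hy => hb y (List.mem_cons_of_mem x hy))
    · simp only [hx]
      intro hc
      rcases List.mem_cons.1 hc with rfl | hmem
      · exact hx (beq_self_eq_true c)
      · have hcx : c < x := lt_of_le_of_ne (hb x (List.mem_cons_self ..)) (fun he => hx (by simp [he.symm]))
        exact absurd ((List.pairwise_cons.1 hp).1 c hmem) (not_le.2 hcx)

theorem pvGroups_iff (record : List (String × Int)) (l : List Char)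
    (hp : l.Pairwise (· ≤ ·)) : pvGroups record l = true ↔ pvQ record l := by
  induction hl : l.length using Nat.strong_induction_on generalizing l with
  | _ n ih =>
  cases l with
  | nil => simp [pvGroups, pvQ]
  | cons c rest =>
    subst hl
    set tw := rest.takeWhile (· == c) with htw
    set dw := rest.dropWhile (· == c) with hdw
    have hsplit : rest = tw ++ dw := (List.takeWhile_append_dropWhile).symm
    have htwc : ∀ x ∈ tw, x = c := by
      intro x hx
      have := List.mem_takeWhile_imp hx
      simpa using this
    have hcdw : c ∉ dw :=
      pv_no_c_after c rest (List.Pairwise.of_cons hp) (fun x hx => (List.pairwise_cons.1 hp).1 x hx)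
    have hcount_c : (c :: rest).count c = tw.length + 1 := by
      rw [List.count_cons_self, hsplit, List.count_append]
      rw [List.count_eq_length.2 (fun b hb => (htwc b hb).symm),
          List.count_eq_zero.2 hcdw]
    have hcount_dw : ∀ c' ∈ dw, (c :: rest).count c' = dw.count c' := by
      intro c' hc'
      have hne : c' ≠ c := fun he => hcdw (he ▸ hc')
      rw [hsplit]
      simp [List.count_append,
            List.count_eq_zero.2 (fun hmem => hne (htwc c' hmem)),
            (show ¬c = c' from fun h => hne h.symm)]
    have hpdw : dw.Pairwise (· ≤ ·) :=
      (List.Pairwise.of_cons hp).sublist (List.dropWhile_sublist _)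
    have hlen : dw.length < (c :: rest).length := by
      have h := List.length_dropWhile_le (· == c) rest
      rw [← hdw] at h
      simp only [List.length_cons]; omega
    rw [pvGroups]
    cases hlook : pvLookup record (pvS1 c) with
    | none =>
      simp only [Bool.false_eq_true, false_iff]
      intro h
      obtain ⟨r, hr, _⟩ := h c (List.mem_cons_self ..)
      rw [hlook] at hr; simp at hr
    | some r =>
      by_cases hrn : r < ((tw.length : Int) + 1)
      · simp only [← htw, hrn, if_true, Bool.false_eq_true, false_iff]
        intro h
        obtain ⟨r', hr', hle⟩ := h c (List.mem_cons_self ..)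
        rw [hlook] at hr'
        obtain rfl : r = r' := Option.some.inj hr'
        rw [hcount_c] at hle
        push_cast at hle
        omega
      · simp only [← htw, hrn, if_false, ← hdw]
        rw [ih dw.length hlen dw hpdw rfl]
        constructor
        · intro h c' hc'
          rcases List.mem_cons.1 hc' with rfl | hmem
          · exact ⟨r, hlook, by rw [hcount_c]; push_cast; omega⟩
          · rw [hsplit] at hmem
            rcases List.mem_append.1 hmem with hmem | hmem
            · rw [htwc c' hmem]
              exact ⟨r, hlook, by rw [hcount_c]; push_cast; omega⟩
            · obtain ⟨r', hr', hle⟩ := h c' hmem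
              exact ⟨r', hr', by rw [hcount_dw c' hmem]; exact hle⟩
        · intro h c' hc'
          obtain ⟨r', hr', hle⟩ := h c' (by rw [hsplit]; exact List.mem_cons_of_mem c (List.mem_append_right tw hc'))
          exact ⟨r', hr', by rw [← hcount_dw c' hc']; exact hle⟩

theorem contain_t_alt_iff (record : List (String × Int)) (t : String) :
    contain_t_alt record t = true ↔ pvQ record t.toList := by
  unfold contain_t_alt
  rw [pvScan_eq_groups, List.drop_zero,
      pvGroups_iff _ _ (by simpa using PySem.List.sorted_pairwise t.toList (fun x => x) : _),
      pvQ_perm record (PySem.List.sorted_perm t.toList (fun x => x) false)]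

-- ===== VERDICT (by name: the statement is the Claim_ definition above) =====
theorem contain_t_spec : Claim_equal_contain_t := by
  intro record t _
  unfold Spec_contain_t
  rw [Bool.eq_iff_iff, contain_t_iff, contain_t_alt_iff]
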